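-- pv_equiv track=rewrite | github.com/grzes5003/MethamorphicCoder | analyze_r2/cmp_opcode.py | extract_opcodes
-- ===== SOURCE A (Python) =====
-- def extract_opcodes(program):
--     opcodes = []
--     opcode_counter = 0
--
--     for line in program:
--         line = line.strip()
--         if line and not line.startswith(("#", ".", ":", ";")):
--             opcodes.append(opcode_counter)
--             opcode_counter += 1
--
--     return opcodes
-- ===== SOURCE B (Python) =====
-- def extract_opcodes(program):
--     if len(program) <= 1:
--         if program:
--             s = program[0].strip()
--             if s and not s.startswith(("#", ".", ":", ";")):
--                 return [0]
--         return []
--     mid = len(program) // 2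
--     left = extract_opcodes(program[:mid])
--     right = extract_opcodes(program[mid:])
--     return left + [len(left) + i for i in right]
-- ===== Notes on version B (the rewrite author's own statement) =====
-- stated objective: alternative
-- what changed: B replaces A's forward scan with an incrementing counter by a divide-and-conquer recursion: it solves the two halves of the program independently and merges by shifting the right half's indices up by the size of the left result.
import Mathlib
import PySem

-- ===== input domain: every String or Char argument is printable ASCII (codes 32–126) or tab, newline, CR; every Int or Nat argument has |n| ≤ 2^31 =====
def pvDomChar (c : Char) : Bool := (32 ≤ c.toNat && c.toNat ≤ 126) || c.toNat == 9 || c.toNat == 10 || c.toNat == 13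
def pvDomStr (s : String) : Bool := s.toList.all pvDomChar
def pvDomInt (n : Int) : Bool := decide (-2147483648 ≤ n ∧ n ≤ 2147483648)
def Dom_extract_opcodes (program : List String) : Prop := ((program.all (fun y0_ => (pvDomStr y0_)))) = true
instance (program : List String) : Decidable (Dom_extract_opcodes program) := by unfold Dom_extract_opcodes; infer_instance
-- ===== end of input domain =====

-- B computes the indices by divide and conquer (solve each half, merge by shifting the right half's indices) instead of A's forward counter scan; an alternative algorithm, not claimed faster.

-- ===== PORT A =====
-- forward loop with state (opcodes, opcode_counter); appends the counter on each qualifying line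
def extract_opcodes (program : List String) : List Int :=
  (program.foldl
    (fun (st : List Int × Int) line =>
      let l := PySem.Str.strip line
      if (l != "" &&
          !(PySem.Str.startswith l "#" || PySem.Str.startswith l "." ||
            PySem.Str.startswith l ":" || PySem.Str.startswith l ";")) then
        (st.1 ++ [st.2], st.2 + 1)
      else st)
    ([], 0)).1

-- ===== PORT B =====
-- divide and conquer: base case ≤ 1 line; otherwise split at the midpoint, solve both halves,
-- and append the right half's result with its indices shifted by the left result's length
def extract_opcodes_alt (program : List String) : List Int :=
  if program.length ≤ 1 then
    match program with
    | [] => []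
    | x :: _ =>
      let s := PySem.Str.strip x
      if (s != "" &&
          !(PySem.Str.startswith s "#" || PySem.Str.startswith s "." ||
            PySem.Str.startswith s ":" || PySem.Str.startswith s ";")) then [0]
      else []
  else
    let mid := program.length / 2
    let left := extract_opcodes_alt (program.take mid)
    let right := extract_opcodes_alt (program.drop mid)
    left ++ right.map (fun i => (left.length : Int) + i)
termination_by program.length
decreasing_by
  · simp [List.length_take]; omega
  · simp [List.length_drop]; omega

-- ===== PRECONDITION & SPEC =====
def Spec_extract_opcodes (program : List String) (out : List Int) : Prop := out = extract_opcodes_alt program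
instance (program : List String) (out : List Int) : Decidable (Spec_extract_opcodes program out) := by unfold Spec_extract_opcodes; infer_instance

-- ===== CLAIM (what is proved, stated in full; the proofs are below) =====
def Claim_equal_extract_opcodes : Prop := ∀ (program : List String), Dom_extract_opcodes program → Spec_extract_opcodes program (extract_opcodes program)

-- ===== LEMMAS AND PROOFS =====

-- the qualifying-line predicate, used by the proofs only
def pvQual (line : String) : Bool :=
  let l := PySem.Str.strip line
  l != "" &&
    !(PySem.Str.startswith l "#" || PySem.Str.startswith l "." ||
      PySem.Str.startswith l ":" || PySem.Str.startswith l ";")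

-- A's fold, started at (acc, c), ends with acc ++ range(c, c + #qualifying) and the bumped counter.
theorem extract_opcodes_foldl_inv (l : List String) (acc : List Int) (c : Int) :
    l.foldl
      (fun (st : List Int × Int) line =>
        let s := PySem.Str.strip line
        if (s != "" &&
            !(PySem.Str.startswith s "#" || PySem.Str.startswith s "." ||
              PySem.Str.startswith s ":" || PySem.Str.startswith s ";")) then
          (st.1 ++ [st.2], st.2 + 1)
        else st)
      (acc, c)
    = (acc ++ PySem.List.pyRange c (c + (l.countP pvQual : Nat)) 1, c + (l.countP pvQual : Nat)) := by
  induction l generalizing acc c with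
  | nil => simp [PySem.List.pyRange_one_eq_nil]
  | cons x xs ih =>
    by_cases h : pvQual x = true
    · have hx : (let s := PySem.Str.strip x;
        (s != "" &&
            !(PySem.Str.startswith s "#" || PySem.Str.startswith s "." ||
              PySem.Str.startswith s ":" || PySem.Str.startswith s ";"))) = true := h
      simp only [List.foldl_cons, hx, if_pos, List.countP_cons, h]
      rw [ih]
      have hr : PySem.List.pyRange c (c + ((xs.countP pvQual : Nat) + 1)) 1
          = c :: PySem.List.pyRange (c + 1) (c + ((xs.countP pvQual : Nat) + 1)) 1 := by
        apply PySem.List.pyRange_one_cons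
        have : (0 : Int) ≤ (xs.countP pvQual : Nat) := Int.natCast_nonneg _
        omega
      push_cast
      push_cast at hr
      rw [show c + ((xs.countP pvQual : Int) + 1) = c + 1 + (xs.countP pvQual : Int) by ring] at hr ⊢
      rw [hr]
      simp
    · have hx : (let s := PySem.Str.strip x;
        (s != "" &&
            !(PySem.Str.startswith s "#" || PySem.Str.startswith s "." ||
              PySem.Str.startswith s ":" || PySem.Str.startswith s ";"))) = false := by
        simpa [pvQual] using h
      simp only [List.foldl_cons, hx, Bool.false_eq_true, if_false, List.countP_cons, h]
      simpa using ih acc c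

-- B's divide-and-conquer produces range(0, #qualifying)
theorem extract_opcodes_alt_eq_range (program : List String) :
    extract_opcodes_alt program
      = PySem.List.pyRange 0 ((program.countP pvQual : Nat) : Int) 1 := by
  fun_induction extract_opcodes_alt program with
  | case1 h => simp [PySem.List.pyRange_one_eq_nil]
  | case2 x t s hq h =>
    have ht : t = [] := by simp only [List.length_cons] at h; exact List.eq_nil_of_length_eq_zero (by omega)
    subst ht
    have hq' : pvQual x = true := hq
    simp [hq', PySem.List.pyRange_one]
  | case3 x t s hq h =>
    have ht : t = [] := by simp only [List.length_cons] at h; exact List.eq_nil_of_length_eq_zero (by omega)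
    subst ht
    have hq' : pvQual x = false := Bool.eq_false_iff.mpr hq
    simp [hq', PySem.List.pyRange_one_eq_nil]
  | case4 p h mid left right ihR ihL =>
    simp only [left, right, mid] at *
    rw [ihL, ihR]
    set cL := ((p.take (p.length / 2)).countP pvQual : Int) with hcL
    set cR := ((p.drop (p.length / 2)).countP pvQual : Int) with hcR
    have hL0 : (0 : Int) ≤ cL := by positivity
    have hR0 : (0 : Int) ≤ cR := by positivity
    have hlen : ((PySem.List.pyRange 0 cL 1).length : Int) = cL := by
      rw [PySem.List.length_pyRange_one]; omega
    have hmap : (PySem.List.pyRange 0 cR 1).map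
        (fun i => ((PySem.List.pyRange 0 cL 1).length : Int) + i)
        = PySem.List.pyRange cL (cL + cR) 1 := by
      rw [hlen]
      simp [PySem.List.pyRange_one, List.map_map, Function.comp]
    rw [hmap]
    have hcount : ((p.countP pvQual : Nat) : Int) = cL + cR := by
      conv_lhs => rw [← List.take_append_drop (p.length / 2) p]
      rw [List.countP_append]; push_cast; omega
    rw [hcount, ← PySem.List.pyRange_one_append 0 cL (cL + cR) hL0 (by omega)]

-- ===== VERDICT (by name: the statement is the Claim_ definition above) =====
theorem extract_opcodes_spec : Claim_equal_extract_opcodes := by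
  intro program _
  unfold Spec_extract_opcodes
  rw [extract_opcodes_alt_eq_range]
  unfold extract_opcodes
  rw [extract_opcodes_foldl_inv]
  simp
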